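-- pv_equiv track=rewrite | github.com/chebupelka8/PyPad-v.2 | scr/scripts/code_analyzer.py | find_tabs_in_string_by_spaces
-- ===== SOURCE A (Python) =====
-- def find_tabs_in_string_by_spaces(string, __cursor_index: int, __tab_count: int = 4) -> int:
--     res = 0
--
--     for i, letter in enumerate(string):
--         if letter == " " and i < __cursor_index:
--             res += 1
--
--         else:
--             break
--
--     return res // __tab_count
-- ===== SOURCE B (Python) =====
-- def find_tabs_in_string_by_spaces(string, __cursor_index: int, __tab_count: int = 4) -> int:
--     n = __cursor_index if __cursor_index > 0 else 0
--     prefix = string[:n]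
--     res = len(prefix) - len(prefix.lstrip(' '))
--     return res // __tab_count
-- ===== Notes on version B (the rewrite author's own statement) =====
-- stated objective: simpler
-- what changed: Replaces the explicit enumerate loop with break by a slice of the first max(cursor,0) characters and len(prefix) - len(prefix.lstrip(' ')) to count the leading-space run.
-- outside the precondition, e.g. on find_tabs_in_string_by_spaces('    x', 3, 0): A raises ZeroDivisionError, B raises ZeroDivisionError
import Mathlib
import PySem

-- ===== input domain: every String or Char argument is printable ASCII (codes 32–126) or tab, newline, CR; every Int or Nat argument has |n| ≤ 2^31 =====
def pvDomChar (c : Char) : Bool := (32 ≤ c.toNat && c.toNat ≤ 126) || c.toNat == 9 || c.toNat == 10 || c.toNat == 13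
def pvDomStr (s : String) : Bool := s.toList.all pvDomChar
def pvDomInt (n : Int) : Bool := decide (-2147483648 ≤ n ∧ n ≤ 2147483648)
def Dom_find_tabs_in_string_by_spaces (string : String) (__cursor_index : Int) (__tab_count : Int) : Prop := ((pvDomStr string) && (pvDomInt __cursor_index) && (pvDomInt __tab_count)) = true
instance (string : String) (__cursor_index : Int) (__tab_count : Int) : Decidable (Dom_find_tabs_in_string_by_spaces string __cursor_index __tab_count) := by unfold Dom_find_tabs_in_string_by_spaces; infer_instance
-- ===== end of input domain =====

-- ===== PORT A =====
-- B replaces A's explicit enumerate loop with a slice + lstrip(' ') length difference; simpler decomposition.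
def ftLoopA (ci : Int) : List (Int × Char) → Int → Int
  | [], res => res
  | (i, letter) :: rest, res =>
      if letter = ' ' ∧ i < ci then ftLoopA ci rest (res + 1) else res

def find_tabs_in_string_by_spaces (string : String) (__cursor_index : Int) (__tab_count : Int) : Int :=
  PySem.Int.floordiv (ftLoopA __cursor_index (PySem.List.enumerate string.toList 0) 0) __tab_count

-- ===== PORT B =====
-- hand port of Python's s.lstrip(' ') (strip ONLY the space character on the left): exact on all strings
def pyLstripSpace (s : String) : String := String.ofList (s.toList.dropWhile (· = ' '))

def find_tabs_in_string_by_spaces_alt (string : String) (__cursor_index : Int) (__tab_count : Int) : Int :=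
  let n : Int := if __cursor_index > 0 then __cursor_index else 0
  let pre : String := PySem.Str.slice string none (some n)
  let res : Int := PySem.Str.len pre - PySem.Str.len (pyLstripSpace pre)
  PySem.Int.floordiv res __tab_count

-- ===== PRECONDITION & SPEC =====
-- Pre_ excludes only __tab_count = 0, where A raises ZeroDivisionError (so does B).
def Pre_find_tabs_in_string_by_spaces (string : String) (__cursor_index : Int) (__tab_count : Int) : Prop := __tab_count ≠ 0
instance (string : String) (__cursor_index : Int) (__tab_count : Int) : Decidable (Pre_find_tabs_in_string_by_spaces string __cursor_index __tab_count) := by unfold Pre_find_tabs_in_string_by_spaces; infer_instance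

def pvWitness_find_tabs_in_string_by_spaces : String × Int × Int := ("    foo", 6, 4)

def Spec_find_tabs_in_string_by_spaces (string : String) (__cursor_index : Int) (__tab_count : Int) (out : Int) : Prop := out = find_tabs_in_string_by_spaces_alt string __cursor_index __tab_count
instance (string : String) (__cursor_index : Int) (__tab_count : Int) (out : Int) : Decidable (Spec_find_tabs_in_string_by_spaces string __cursor_index __tab_count out) := by unfold Spec_find_tabs_in_string_by_spaces; infer_instance

-- ===== CLAIM (what is proved, stated in full; the proofs are below) =====
def Claim_equal_find_tabs_in_string_by_spaces : Prop := ∀ (string : String) (__cursor_index : Int) (__tab_count : Int), Dom_find_tabs_in_string_by_spaces string __cursor_index __tab_count → Pre_find_tabs_in_string_by_spaces string __cursor_index __tab_count → Spec_find_tabs_in_string_by_spaces string __cursor_index __tab_count (find_tabs_in_string_by_spaces string __cursor_index __tab_count)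

-- ===== LEMMAS AND PROOFS =====

-- A's loop counts the leading-space run of cs, capped at ci - s (clamped at 0).
theorem ftLoopA_eq (ci : Int) (cs : List Char) (s res : Int) :
    ftLoopA ci (PySem.List.enumerate cs s) res
      = res + min ((cs.takeWhile (· = ' ')).length : Int) (max (ci - s) 0) := by
  induction cs generalizing s res with
  | nil => simp [PySem.List.enumerate_nil, ftLoopA]
  | cons c rest ih =>
    rw [PySem.List.enumerate_cons]
    by_cases hc : c = ' '
    · by_cases hs : s < ci
      · have h0 : (0:Int) ≤ ((rest.takeWhile (· = ' ')).length : Int) := by positivity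
        simp only [ftLoopA, hs, and_self, if_true, ih, List.takeWhile_cons, hc,
          decide_eq_true_eq, if_true, List.length_cons]
        push_cast
        omega
      · have h0 : (0:Int) ≤ ((rest.takeWhile (· = ' ')).length : Int) := by positivity
        simp only [ftLoopA, hs, and_false, if_false, List.takeWhile_cons, hc,
          decide_eq_true_eq, if_true, List.length_cons]
        push_cast
        omega
    · simp [ftLoopA, hc]

-- takeWhile of a prefix: length is the min of the run length and the prefix length.
theorem takeWhile_take_length (p : Char → Bool) (cs : List Char) (m : Nat) :
    ((cs.take m).takeWhile p).length = min (cs.takeWhile p).length m := by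
  induction cs generalizing m with
  | nil => simp
  | cons c rest ih =>
    cases m with
    | zero => simp
    | succ k =>
      by_cases hc : p c
      · simp [hc, ih]
      · simp [hc]

theorem alt_res (string : String) (ci : Int) :
    (let n : Int := if ci > 0 then ci else 0
     let pre : String := PySem.Str.slice string none (some n)
     PySem.Str.len pre - PySem.Str.len (pyLstripSpace pre))
      = min ((string.toList.takeWhile (· = ' ')).length : Int) (max ci 0) := by
  set n : Int := if ci > 0 then ci else 0 with hn
  have hn0 : 0 ≤ n := by rw [hn]; split <;> omega
  have hm : n.toNat = (max ci 0).toNat := by rw [hn]; split <;> omega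
  have hpre : (PySem.Str.slice string none (some n)).toList = string.toList.take n.toNat := by
    rw [PySem.Str.toList_slice]
    simp only [PySem.Chars.slice_eq_listSlice]
    rw [PySem.List.slice_to _ hn0]
  have hof : ∀ l : List Char, (String.ofList l).toList = l := by intro l; simp
  simp only [PySem.Str.len_eq, pyLstripSpace, hof, hpre]
  have hsplit := List.takeWhile_append_dropWhile (p := fun c => decide (c = ' '))
      (l := string.toList.take n.toNat)
  have hlen := congrArg List.length hsplit
  rw [List.length_append, takeWhile_take_length] at hlen
  omega

-- ===== VERDICT (by name: the statement is the Claim_ definition above) =====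
theorem find_tabs_in_string_by_spaces_spec : Claim_equal_find_tabs_in_string_by_spaces := by
  intro string ci tc _ _
  unfold Spec_find_tabs_in_string_by_spaces
  unfold find_tabs_in_string_by_spaces find_tabs_in_string_by_spaces_alt
  rw [ftLoopA_eq]
  have := alt_res string ci
  simp only at this ⊢
  rw [this]
  norm_num
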